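-- pv_equiv track=rewrite | github.com/TFeld00/AdventOfCode | 2025/d03.py | f
-- ===== SOURCE A (Python) =====
-- def f(l,w):
--     n=0
--     i=0
--     for e in range(w-1,-1,-1):
--         a=max(l[i:-e or None])
--         i=l[i:].index(a)+i+1
--         n=10*n+a
--     return n
-- ===== SOURCE B (Python) =====
-- def f(l, w):
--     # Monotonic stack: one left-to-right pass; pop while a strictly larger
--     # element arrives and enough elements remain to still reach length w.
--     stack = []
--     r = len(l)  # elements not yet consumed (including current)
--     for x in l:
--         while stack and stack[-1] < x and len(stack) - 1 + r >= w:
--             stack.pop()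
--         stack.append(x)
--         r -= 1
--     n = 0
--     if w > 0:
--         for d in stack[:w]:
--             n = 10 * n + d
--     return n
-- ===== Notes on version B (the rewrite author's own statement) =====
-- stated objective: faster
-- what changed: A rebuilds each of the w digits by rescanning the remaining suffix with max() plus .index() over fresh slices; B makes a single left-to-right pass keeping a monotonic stack (pop while the top is strictly smaller and enough elements remain to reach length w) and reads the first w stack entries.
import Mathlib
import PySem

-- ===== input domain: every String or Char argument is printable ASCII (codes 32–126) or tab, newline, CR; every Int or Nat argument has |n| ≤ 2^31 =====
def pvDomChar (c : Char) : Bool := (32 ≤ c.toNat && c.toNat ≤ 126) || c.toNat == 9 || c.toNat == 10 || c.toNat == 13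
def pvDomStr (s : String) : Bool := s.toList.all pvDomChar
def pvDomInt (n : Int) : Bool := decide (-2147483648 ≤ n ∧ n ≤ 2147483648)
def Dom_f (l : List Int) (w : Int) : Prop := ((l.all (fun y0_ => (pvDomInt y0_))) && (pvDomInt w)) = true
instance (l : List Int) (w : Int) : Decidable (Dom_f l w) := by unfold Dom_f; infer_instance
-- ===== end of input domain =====

-- B replaces A's per-digit rescans (max + index over slices) by a single monotonic-stack
-- pass; equal return value proved on Pre_f.

-- ===== PORT A =====
-- the body of A's for-loop over range(w-1,-1,-1), state (n, i)
def stepA (l : List Int) (s : Int × Int) (e : Int) : Int × Int :=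
  let seg := if e = 0 then PySem.List.slice l (some s.2) none
             else PySem.List.slice l (some s.2) (some (-e))
  let a := (PySem.List.max? seg (fun y => y)).getD 0
  let i := ((PySem.List.index? (PySem.List.slice l (some s.2) none) a).getD 0 : Int) + s.2 + 1
  (10 * s.1 + a, i)

def f (l : List Int) (w : Int) : Int :=
  ((PySem.List.pyRange (w - 1) (-1) (-1)).foldl (stepA l) (0, 0)).1

-- ===== PORT B =====
-- the inner `while stack and stack[-1] < x and len(stack)-1+r >= w: stack.pop()`
def popW (w r x : Int) : List Int → List Int
  | [] => []
  | t :: rest => if t < x ∧ (rest.length : Int) + r ≥ w then popW w r x rest else t :: rest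

def f_alt (l : List Int) (w : Int) : Int :=
  let st := (l.foldl (fun (s : List Int × Int) x => (x :: popW w s.2 x s.1, s.2 - 1))
              ([], (l.length : Int))).1
  if 0 < w then (st.reverse.take w.toNat).foldl (fun n d => 10 * n + d) 0 else 0

-- ===== PRECONDITION & SPEC =====
-- Pre_f excludes exactly the inputs where A raises: 0 < w with fewer than w elements
-- (max() is called on an empty slice there).
def Pre_f (l : List Int) (w : Int) : Prop := w ≤ (l.length : Int) ∨ w ≤ 0
instance (l : List Int) (w : Int) : Decidable (Pre_f l w) := by unfold Pre_f; infer_instance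
def pvWitness_f : List Int × Int := ([3, 1, 4, 1, 5], 3)


def Spec_f (l : List Int) (w : Int) (out : Int) : Prop := out = f_alt l w
instance (l : List Int) (w : Int) (out : Int) : Decidable (Spec_f l w out) := by unfold Spec_f; infer_instance

-- ===== CLAIM (what is proved, stated in full; the proofs are below) =====
def Claim_equal_f : Prop := ∀ (l : List Int) (w : Int), Dom_f l w → Pre_f l w → Spec_f l w (f l w)

-- ===== LEMMAS AND PROOFS =====

-- the common reference: the greedy pick list (first occurrence of the window max, repeat)
def greedy (l : List Int) : Nat → List Int
  | 0 => []
  | (k+1) =>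
    match PySem.List.max? (l.take (l.length - k)) (fun y => y) with
    | none => []
    | some a =>
      let p := (PySem.List.index? l a).getD 0
      a :: greedy (l.drop (p + 1)) k
termination_by k => l.length + k
decreasing_by simp [List.length_drop]; omega

-- B's fold with explicit start state
def runStack (w : Int) (st : List Int) (r : Int) (xs : List Int) : List Int × Int :=
  xs.foldl (fun s x => (x :: popW w s.2 x s.1, s.2 - 1)) (st, r)

theorem popW_mem {w r x : Int} {st : List Int} {y : Int} (h : y ∈ popW w r x st) : y ∈ st := by
  induction st with
  | nil => simp [popW] at h
  | cons t rest ih =>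
    simp only [popW] at h
    split_ifs at h with hc
    · exact List.mem_cons_of_mem _ (ih h)
    · exact h

theorem popW_all {w r x : Int} {st : List Int} (hlt : ∀ t ∈ st, t < x) (hr : w ≤ r) :
    popW w r x st = [] := by
  induction st with
  | nil => rfl
  | cons t rest ih =>
    simp only [popW]
    rw [if_pos ⟨hlt t (List.mem_cons_self), by have := Int.natCast_nonneg rest.length; omega⟩]
    exact ih (fun t ht => hlt t (List.mem_cons_of_mem _ ht))

theorem runStack_pre {w a : Int} : ∀ (pre : List Int) (st : List Int) (r : Int),
    (∀ t ∈ st, t < a) → (∀ t ∈ pre, t < a) → w ≤ r - pre.length →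
    runStack w st r (pre ++ [a]) = ([a], r - pre.length - 1) := by
  intro pre
  induction pre with
  | nil =>
    intro st r hst _ hr
    simp only [List.nil_append, runStack, List.foldl_cons, List.foldl_nil, List.length_nil]
    rw [popW_all hst (by simpa using hr)]
    simp
  | cons y pre' ih =>
    intro st r hst hpre hr
    simp only [List.cons_append, runStack, List.foldl_cons]
    have hy : y < a := hpre y List.mem_cons_self
    have h1 : ∀ t ∈ y :: popW w r y st, t < a := by
      intro t ht
      rcases List.mem_cons.mp ht with h | h
      · exact h ▸ hy
      · exact hst t (popW_mem h)
    have := ih (y :: popW w r y st) (r - 1) h1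
      (fun t ht => hpre t (List.mem_cons_of_mem _ ht)) (by simp at hr ⊢; omega)
    simp only [runStack] at this
    rw [this]
    simp; omega

theorem popW_shift {w r x a : Int} (h : w ≤ r → ¬ a < x) :
    ∀ (st : List Int), popW w r x (st ++ [a]) = popW (w - 1) r x st ++ [a] := by
  intro st
  induction st with
  | nil =>
    simp only [List.nil_append, popW]
    rw [if_neg]
    rintro ⟨hax, hr⟩
    exact h (by simp at hr; omega) hax
  | cons t rest ih =>
    simp only [List.cons_append, popW, List.length_append, List.length_cons, List.length_nil]
    by_cases hc : t < x ∧ (rest.length : Int) + r ≥ w - 1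
    · rw [if_pos ⟨hc.1, by push_cast; omega⟩, if_pos hc]; exact ih
    · rw [if_neg, if_neg hc]
      · simp
      · rintro ⟨h1, h2⟩; exact hc ⟨h1, by push_cast at h2; omega⟩

theorem runStack_shift {w a : Int} : ∀ (xs : List Int) (st : List Int) (r : Int),
    r = (xs.length : Int) →
    (∀ x ∈ xs.take ((xs.length : Int) - (w - 1)).toNat, x ≤ a) →
    (runStack w (st ++ [a]) r xs).1 = (runStack (w - 1) st r xs).1 ++ [a] := by
  intro xs
  induction xs with
  | nil => intro st r _ _; simp [runStack]
  | cons x rest ih =>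
    intro st r hr hx
    simp only [runStack, List.foldl_cons]
    have hxa : w ≤ r → ¬ a < x := by
      intro hwr
      have h1 : 1 ≤ (((x :: rest).length : Int) - (w - 1)).toNat := by
        simp only [List.length_cons] at hr ⊢; omega
      have hxm : x ∈ (x :: rest).take (((x :: rest).length : Int) - (w - 1)).toNat := by
        rcases Nat.exists_eq_add_of_le h1 with ⟨m, hm⟩
        rw [hm, Nat.add_comm, List.take_succ_cons]
        exact List.mem_cons_self
      have := hx x hxm
      omega
    rw [popW_shift hxa st]
    have hrec := ih (x :: popW (w - 1) r x st) (r - 1) (by simp at hr ⊢; omega) ?_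
    · simpa [runStack] using hrec
    · intro y hy
      by_cases hc : 0 ≤ (rest.length : Int) - (w - 1)
      · apply hx
        have hfull : (((x :: rest).length : Int) - (w - 1)).toNat
            = ((rest.length : Int) - (w - 1)).toNat + 1 := by
          simp only [List.length_cons]; omega
        rw [hfull, List.take_succ_cons]
        exact List.mem_cons_of_mem _ hy
      · have : ((rest.length : Int) - (w - 1)).toNat = 0 := by omega
        rw [this] at hy; simp at hy

theorem stack_eq_greedy : ∀ (k : Nat) (l : List Int), k ≤ l.length →
    ((runStack (k : Int) [] (l.length : Int) l).1.reverse.take k) = greedy l k := by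
  intro k
  induction k with
  | zero => intro l _; simp [greedy]
  | succ k ih =>
    intro l hk
    obtain ⟨n, hn⟩ : ∃ m, m = l.length := ⟨l.length, rfl⟩
    rw [← hn] at hk
    have hwinlen : (l.take (n - k)).length = n - k := by simp; omega
    have hwin_ne : l.take (n - k) ≠ [] := by
      intro h; rw [h] at hwinlen; simp at hwinlen; omega
    obtain ⟨a, ha⟩ : ∃ a, PySem.List.max? (l.take (n - k)) (fun y => y) = some a := by
      rcases h : PySem.List.max? (l.take (n - k)) (fun y => y) with _ | a
      · exact absurd ((PySem.List.max?_eq_none_iff _ _).mp h) hwin_ne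
      · exact ⟨a, rfl⟩
    have ha_mem : a ∈ l.take (n - k) := PySem.List.max?_mem ha
    have hmax : ∀ y ∈ l.take (n - k), y ≤ a := PySem.List.max?_isMax ha
    obtain ⟨q, hq⟩ : ∃ q, PySem.List.index? (l.take (n - k)) a = some q := by
      rcases h : PySem.List.index? (l.take (n - k)) a with _ | q
      · exact absurd ((PySem.List.index?_eq_none_iff _ _).mp h) (by simp [ha_mem])
      · exact ⟨q, rfl⟩
    have hidx : PySem.List.index? l a = some q := by
      conv_lhs => rw [← List.take_append_drop (n - k) l]
      rw [PySem.List.index?_append_of_mem _ ha_mem, hq]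
    obtain ⟨pre, post, hl, hplen, hanp⟩ := (PySem.List.index?_eq_some_iff _ _ _).mp hidx
    obtain ⟨hqlt', -⟩ := PySem.List.getElem_of_index?_eq_some hq
    have hqlt : q < n - k := by rw [hwinlen] at hqlt'; exact hqlt'
    have hpostlen : post.length = n - q - 1 := by
      have h2 := congrArg List.length hl
      simp only [List.length_append, List.length_cons, hplen] at h2
      omega
    have hwin_eq : l.take (n - k) = pre ++ a :: post.take (n - k - q - 1) := by
      conv_lhs => rw [hl]
      rw [List.take_append, List.take_of_length_le (by omega),
        List.take_cons (by omega)]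
      congr 2
      rw [hplen]
    have hpre_lt : ∀ t ∈ pre, t < a := by
      intro t ht
      have htw : t ∈ l.take (n - k) := by rw [hwin_eq]; exact List.mem_append_left _ ht
      rcases lt_or_eq_of_le (hmax t htw) with h | h
      · exact h
      · exact absurd (h ▸ ht) hanp
    have hsplit : l = (pre ++ [a]) ++ post := by simpa using hl
    have hrun1 : runStack ((k : Int) + 1) [] (n : Int) (pre ++ [a])
        = ([a], (n : Int) - q - 1) := by
      rw [runStack_pre pre [] (n : Int) (by simp) hpre_lt (by rw [hplen]; omega)]
      rw [hplen]
    have happ : ∀ (w r : Int) (st xs ys : List Int), runStack w st r (xs ++ ys)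
        = runStack w (runStack w st r xs).1 (runStack w st r xs).2 ys := by
      intro w r st xs ys; simp [runStack, List.foldl_append]
    have hshift : (runStack ((k : Int) + 1) ([] ++ [a]) ((post.length : Int)) post).1
        = (runStack ((k : Int) + 1 - 1) [] ((post.length : Int)) post).1 ++ [a] := by
      apply runStack_shift
      · rfl
      · intro x hx
        apply hmax
        rw [hwin_eq]
        apply List.mem_append_right
        apply List.mem_cons_of_mem
        have hcnt : ((post.length : Int) - ((k : Int) + 1 - 1)).toNat = n - k - q - 1 := by
          rw [hpostlen]; omega
        rwa [hcnt] at hx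
    have hrun : (runStack ((k : Int) + 1) [] (n : Int) l).1
        = (runStack (k : Int) [] ((post.length : Int)) post).1 ++ [a] := by
      rw [hsplit, happ, hrun1]
      show (runStack ((k:Int)+1) [a] ((n : Int) - q - 1) post).1 = _
      rw [show ((n:Int) - q - 1) = ((post.length : Int)) by rw [hpostlen]; omega]
      simp only [List.nil_append] at hshift
      rw [show ((k:Int) + 1 - 1) = (k:Int) by ring] at hshift
      exact hshift
    have hdrop : l.drop (q + 1) = post := by
      rw [hsplit, show q + 1 = (pre ++ [a]).length by simp [hplen]]
      exact List.drop_left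
    have hglue : greedy l (k + 1) = a :: greedy post k := by
      rw [greedy]
      simp only [← hn, ha, hidx, Option.getD_some, hdrop]
    rw [hglue, ← ih post (by omega), ← hn]
    push_cast
    rw [hrun]
    simp [List.take_succ_cons]
theorem slice_neg_stop (xs : List Int) (i k : Int) (hi : 0 ≤ i) (hk : 0 < k) :
    PySem.List.slice xs (some i) (some (-k)) = (xs.drop i.toNat).take (xs.length - k.toNat - i.toNat) := by
  simp only [PySem.List.slice]
  congr 1
  · have h1 : PySem.List.clampIdx xs.length (-k) = xs.length - k.toNat := by
      have : (-k) = -((k.toNat : Nat) : Int) := by omega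
      rw [this, PySem.List.clampIdx_neg_natCast _ _ (by omega)]
    rw [h1, PySem.List.clampIdx_of_nonneg hi]
    omega
  · rw [PySem.List.clampIdx_of_nonneg hi]
    rcases le_or_gt (i.toNat) xs.length with h | h
    · rw [min_eq_left h]
    · rw [min_eq_right (le_of_lt h)]
      rw [List.drop_of_length_le le_rfl, List.drop_of_length_le (le_of_lt h)]

theorem window_index {l' : List Int} {m : Nat} {a : Int}
    (ha : PySem.List.max? (l'.take m) (fun y => y) = some a) :
    ∃ p, PySem.List.index? l' a = some p ∧ p < m := by
  have hmem := PySem.List.max?_mem ha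
  obtain ⟨q, hq⟩ : ∃ q, PySem.List.index? (l'.take m) a = some q := by
    rcases h : PySem.List.index? (l'.take m) a with _ | q
    · exact absurd ((PySem.List.index?_eq_none_iff _ _).mp h) (by simp [hmem])
    · exact ⟨q, rfl⟩
  obtain ⟨hql, -⟩ := PySem.List.getElem_of_index?_eq_some hq
  have hqm : q < m := lt_of_lt_of_le hql (by simp)
  refine ⟨q, ?_, hqm⟩
  conv_lhs => rw [← List.take_append_drop m l']
  rw [PySem.List.index?_append_of_mem _ hmem, hq]

theorem A_loop (l : List Int) : ∀ (k : Nat) (i nacc : Int), 0 ≤ i → (k : Int) ≤ (l.length : Int) - i →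
    ((PySem.List.pyRange ((k : Int) - 1) (-1) (-1)).foldl (stepA l) (nacc, i)).1
    = (greedy (l.drop i.toNat) k).foldl (fun n d => 10 * n + d) nacc := by
  intro k
  induction k with
  | zero =>
    intro i nacc hi hk
    rw [show ((0:Nat):Int) - 1 = (-1) by simp, PySem.List.pyRange_neg_one_eq_nil le_rfl]
    simp [greedy]
  | succ k ih =>
    intro i nacc hi hk
    push_cast at hk
    rw [show ((k+1:Nat):Int) - 1 = (k:Int) by push_cast; ring,
      PySem.List.pyRange_neg_one_cons (by omega), List.foldl_cons]
    have hlen' : (l.drop i.toNat).length = l.length - i.toNat := by simp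
    have hseg : (if (k:Int) = 0 then PySem.List.slice l (some i) none
        else PySem.List.slice l (some i) (some (-(k:Int))))
        = (l.drop i.toNat).take ((l.drop i.toNat).length - k) := by
      by_cases hk0 : (k:Int) = 0
      · rw [if_pos hk0, PySem.List.slice_from _ hi]
        rw [show k = 0 by omega]
        rw [List.take_of_length_le (by omega)]
      · rw [if_neg hk0, slice_neg_stop l i (k:Int) hi (by omega)]
        congr 1
        omega
    have hwlen : ((l.drop i.toNat).take ((l.drop i.toNat).length - k)).length
        = (l.drop i.toNat).length - k := by simp
    obtain ⟨a, ha⟩ : ∃ a, PySem.List.max?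
        ((l.drop i.toNat).take ((l.drop i.toNat).length - k)) (fun y => y) = some a := by
      rcases h : PySem.List.max? ((l.drop i.toNat).take ((l.drop i.toNat).length - k)) (fun y => y) with _ | a
      · have := (PySem.List.max?_eq_none_iff _ _).mp h
        rw [this] at hwlen
        simp at hwlen
        omega
      · exact ⟨a, rfl⟩
    obtain ⟨p, hp, hpm⟩ := window_index ha
    -- evaluate one loop step
    have hstep : stepA l (nacc, i) (k:Int) = (10 * nacc + a, (p:Int) + i + 1) := by
      unfold stepA
      rw [hseg]
      simp only [PySem.List.slice_from _ hi, ha, Option.getD_some, hp]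
    rw [hstep]
    have hi' : (((p:Int) + i + 1).toNat) = (p + 1) + i.toNat := by omega
    have hdrop' : l.drop (((p:Int) + i + 1).toNat) = (l.drop i.toNat).drop (p + 1) := by
      rw [hi']
      simp [List.drop_drop, Nat.add_comm]
    have hrec := ih ((p:Int) + i + 1) (10 * nacc + a) (by omega)
      (by rw [hlen'] at hpm; omega)
    rw [hrec, hdrop']
    have hglue : greedy (l.drop i.toNat) (k + 1)
        = a :: greedy ((l.drop i.toNat).drop (p + 1)) k := by
      rw [greedy]
      simp only [ha, hp, Option.getD_some]
    rw [hglue, List.foldl_cons]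

theorem f_spec : Claim_equal_f := by
  unfold Claim_equal_f Spec_f Pre_f
  intro l w _ hpre
  by_cases hw : 0 < w
  · have hwl : w ≤ (l.length : Int) := by
      rcases hpre with h | h
      · exact h
      · omega
    obtain ⟨k, hk⟩ : ∃ k : Nat, (k : Int) = w := ⟨w.toNat, by omega⟩
    have hkl : k ≤ l.length := by omega
    -- A's side
    have hA : f l w = (greedy l k).foldl (fun n d => 10 * n + d) 0 := by
      unfold f
      rw [← hk]
      rw [A_loop l k 0 0 le_rfl (by omega)]
      simp
    -- B's side
    have hB : f_alt l w = (greedy l k).foldl (fun n d => 10 * n + d) 0 := by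
      unfold f_alt
      rw [if_pos hw]
      have hst : (l.foldl (fun (s : List Int × Int) x => (x :: popW w s.2 x s.1, s.2 - 1))
          ([], (l.length : Int))) = runStack w [] (l.length : Int) l := rfl
      rw [hst, ← hk]
      rw [show ((k : Int).toNat) = k by omega]
      rw [stack_eq_greedy k l hkl]
    rw [hA, hB]
  · have hwz : w - 1 ≤ -1 := by omega
    unfold f f_alt
    rw [PySem.List.pyRange_neg_one_eq_nil hwz]
    simp [hw]
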